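-- pv_equiv track=rewrite | github.com/zhang123999-qq/DjangoBlog | apps/tools/tool_modules/number_converter_tool.py | format_with_separators
-- ===== SOURCE A (Python) =====
-- def format_with_separators(number, base, separator="_", group_size=None):
--     """Format number with separators for readability"""
--     if group_size is None:
--         group_size = {2: 8, 8: 3, 10: 3, 16: 4}.get(base, 4)
--
--     if base == 2:
--         s = bin(number)[2:]
--     elif base == 8:
--         s = oct(number)[2:]
--     elif base == 10:
--         s = str(number)
--     elif base == 16:
--         s = hex(number)[2:]
--     else:
--         s = str(number)
--
--     # Pad to multiple of group_size
--     if len(s) % group_size != 0: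
--         s = "0" * (group_size - len(s) % group_size) + s
--
--     # Add separators
--     groups = [s[i : i + group_size] for i in range(0, len(s), group_size)]
--     return separator.join(groups)
-- ===== SOURCE B (Python) =====
-- def _digits(number, base):
--     if base == 2:
--         return bin(number)[2:]
--     if base == 8:
--         return oct(number)[2:]
--     if base == 16:
--         return hex(number)[2:]
--     return str(number)
--
--
-- def format_with_separators(number, base, separator="_", group_size=None):
--     """Format number with separators, grouping right-to-left."""
--     if group_size is None:
--         group_size = {2: 8, 8: 3, 10: 3, 16: 4}.get(base, 4)
--     s = _digits(number, base)
--     groups = []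
--     i = len(s)
--     while i > 0:
--         j = max(0, i - group_size)
--         groups.append(s[j:i])
--         i = j
--     groups[-1] = groups[-1].rjust(group_size, "0")
--     groups.reverse()
--     return separator.join(groups)
-- ===== Notes on version B (the rewrite author's own statement) =====
-- stated objective: alternative
-- what changed: A pads the whole digit string to a multiple of group_size and slices forward with range(0,len,g); B never pads the string: it walks the digits right-to-left collecting chunks of group_size, right-justifies only the leftmost chunk with zeros, and reverses the chunk list before joining.
-- outside the precondition, e.g. on format_with_separators(5, 10, '_', 0): A raises ZeroDivisionError, B does not finish within the time limit; on format_with_separators(5, 10, '_', -2): A returns '', B does not finish within the time limit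
import Mathlib
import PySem

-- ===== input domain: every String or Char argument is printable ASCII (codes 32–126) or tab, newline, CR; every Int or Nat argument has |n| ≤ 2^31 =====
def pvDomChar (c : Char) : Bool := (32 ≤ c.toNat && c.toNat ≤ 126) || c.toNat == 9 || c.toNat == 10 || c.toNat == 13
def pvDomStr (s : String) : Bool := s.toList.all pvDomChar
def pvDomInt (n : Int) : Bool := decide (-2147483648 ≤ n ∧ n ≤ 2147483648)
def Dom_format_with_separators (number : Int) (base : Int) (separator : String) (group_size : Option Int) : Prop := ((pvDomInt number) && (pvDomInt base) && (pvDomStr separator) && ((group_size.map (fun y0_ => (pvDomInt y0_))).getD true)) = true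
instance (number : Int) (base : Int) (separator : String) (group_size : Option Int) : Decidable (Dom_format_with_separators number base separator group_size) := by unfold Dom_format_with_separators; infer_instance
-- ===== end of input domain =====

-- B groups the digit string right-to-left and zero-pads only the leftmost chunk, instead of
-- A's pad-the-whole-string-then-forward-slice; same results, a different decomposition.


-- ===== PORT A =====

-- hand port of CPython oct(n) (PySem has no oct): optional '-', then "0o", then base-8 digits; exact for all ints
def pyOctChars (n : Int) : List Char :=
  if n < 0 then '-' :: '0' :: 'o' :: Nat.toDigits 8 n.natAbs else '0' :: 'o' :: Nat.toDigits 8 n.toNat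

-- hand port of CPython hex(n): optional '-', then "0x", then lowercase base-16 digits (Nat.digitChar is lowercase); exact for all ints
def pyHexChars (n : Int) : List Char :=
  if n < 0 then '-' :: '0' :: 'x' :: Nat.toDigits 16 n.natAbs else '0' :: 'x' :: Nat.toDigits 16 n.toNat

def format_with_separators (number : Int) (base : Int) (separator : String) (group_size : Option Int) : String :=
  -- group_size = {2: 8, 8: 3, 10: 3, 16: 4}.get(base, 4) when None
  let g : Int := match group_size with
    | none => if base = 2 then 8 else if base = 8 then 3 else if base = 10 then 3 else if base = 16 then 4 else 4
    | some gs => gs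
  -- the base-selection chain; '[2:]' is drop 2 (start index 2 ≥ 0; exact, the prefixed strings have length ≥ 3)
  let s0 : List Char :=
    if base = 2 then ((PySem.Int.pyBin number).toList).drop 2
    else if base = 8 then (pyOctChars number).drop 2
    else if base = 10 then PySem.Int.toChars number
    else if base = 16 then (pyHexChars number).drop 2
    else PySem.Int.toChars number
  -- if len(s) % group_size != 0: s = "0" * (group_size - len(s) % group_size) + s
  let s : List Char :=
    if PySem.Int.mod (PySem.List.len s0) g ≠ 0 then
      List.replicate (g - PySem.Int.mod (PySem.List.len s0) g).toNat '0' ++ s0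
    else s0
  -- groups = [s[i : i + group_size] for i in range(0, len(s), group_size)]
  let groups : List (List Char) :=
    (PySem.List.pyRange 0 (PySem.List.len s) g).map (fun i => PySem.List.slice s (some i) (some (i + g)))
  String.ofList (PySem.Chars.join separator.toList groups)

-- ===== PORT B =====

-- _digits(number, base)
def fws_digits (number : Int) (base : Int) : List Char :=
  if base = 2 then ((PySem.Int.pyBin number).toList).drop 2
  else if base = 8 then (pyOctChars number).drop 2
  else if base = 16 then (pyHexChars number).drop 2
  else PySem.Int.toChars number

-- while i > 0: j = max(0, i - group_size); groups.append(s[j:i]); i = j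
-- (accumulating by cons, so the final list is already python's groups reversed)
def fws_loop (s : List Char) (g : Int) (i : Nat) (groups : List (List Char)) : List (List Char) :=
  if 0 < i then
    let j : Nat := i - g.toNat   -- max(0, i - group_size) for g > 0
    if _h : j < i then fws_loop s g j (((s.drop j).take (i - j)) :: groups)
    else groups   -- j = i only when g ≤ 0, where the Python loop never terminates (outside Pre_)
  else groups
termination_by i

def format_with_separators_alt (number : Int) (base : Int) (separator : String) (group_size : Option Int) : String :=
  let g : Int := match group_size with
    | none => if base = 2 then 8 else if base = 8 then 3 else if base = 10 then 3 else if base = 16 then 4 else 4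
    | some gs => gs
  let s := fws_digits number base
  match fws_loop s g s.length [] with
  | [] => ""   -- unreachable: s is never empty, so the loop yields at least one group
  | c :: rest =>
    -- groups[-1] = groups[-1].rjust(group_size, "0"); groups.reverse(); separator.join(groups)
    String.ofList (PySem.Chars.join separator.toList ((List.replicate (g.toNat - c.length) '0' ++ c) :: rest))

-- ===== PRECONDITION & SPEC =====
-- Pre_ excludes only an explicitly passed group_size ≤ 0: for group_size = 0 A raises
-- ZeroDivisionError, and for negative group_size A's empty range() accidentally returns ""
-- while B's natural right-to-left walk does not terminate.
def Pre_format_with_separators (number : Int) (base : Int) (separator : String) (group_size : Option Int) : Prop :=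
  0 < group_size.getD 1
instance (number : Int) (base : Int) (separator : String) (group_size : Option Int) : Decidable (Pre_format_with_separators number base separator group_size) := by unfold Pre_format_with_separators; infer_instance

def pvWitness_format_with_separators : Int × Int × String × Option Int := (255, 16, ":", none)

def Spec_format_with_separators (number : Int) (base : Int) (separator : String) (group_size : Option Int) (out : String) : Prop := out = format_with_separators_alt number base separator group_size
instance (number : Int) (base : Int) (separator : String) (group_size : Option Int) (out : String) : Decidable (Spec_format_with_separators number base separator group_size out) := by unfold Spec_format_with_separators; infer_instance

-- ===== CLAIM (what is proved, stated in full; the proofs are below) =====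
def Claim_equal_format_with_separators : Prop := ∀ (number : Int) (base : Int) (separator : String) (group_size : Option Int), Dom_format_with_separators number base separator group_size → Pre_format_with_separators number base separator group_size → Spec_format_with_separators number base separator group_size (format_with_separators number base separator group_size)

-- ===== LEMMAS AND PROOFS =====

-- forward chunks of size g+1 (A's slicing, structurally)
def chunksL (g : Nat) (t : List Char) : List (List Char) :=
  if h : t = [] then [] else t.take (g+1) :: chunksL g (t.drop (g+1))
termination_by t.length
decreasing_by have := List.length_pos_of_ne_nil h; simp; omega

-- right-to-left chunks of size g+1, in left-to-right order (B's grouping, structurally)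
def chunksR (g : Nat) (t : List Char) : List (List Char) :=
  if _h : t.length ≤ g+1 then [t]
  else chunksR g (t.take (t.length - (g+1))) ++ [t.drop (t.length - (g+1))]
termination_by t.length
decreasing_by simp; omega

lemma tdc_ne (b : Nat) : ∀ (f n : Nat) (acc : List Char), acc ≠ [] → Nat.toDigitsCore b f n acc ≠ []
  | 0, n, acc, h => by simpa [Nat.toDigitsCore] using h
  | f+1, n, acc, h => by
    simp only [Nat.toDigitsCore]
    split
    · simp
    · exact tdc_ne b f (n / b) _ (by simp)

lemma toDigits_ne_nil (b n : Nat) : Nat.toDigits b n ≠ [] := by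
  unfold Nat.toDigits Nat.toDigitsCore
  dsimp only
  split
  · simp
  · exact tdc_ne b _ _ _ (by simp)

lemma fws_digits_ne_nil (number base : Int) : fws_digits number base ≠ [] := by
  unfold fws_digits
  split_ifs <;>
    simp only [PySem.Int.toList_pyBin, PySem.Int.toBinChars0b, pyOctChars, pyHexChars,
               PySem.Int.toChars] <;>
    split <;> simp [toDigits_ne_nil]

lemma loop_eq (s : List Char) (g : Int) (hg : 0 < g) :
    ∀ (i : Nat) (acc : List (List Char)), i ≤ s.length →
      fws_loop s g i acc = (if i = 0 then [] else chunksR (g.toNat - 1) (s.take i)) ++ acc := by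
  have hGG : g.toNat - 1 + 1 = g.toNat := by omega
  intro i
  induction i using Nat.strong_induction_on with
  | _ i IH =>
    intro acc hile
    rw [fws_loop]
    by_cases h0 : 0 < i
    · have hG : 0 < g.toNat := by omega
      have hj : i - g.toNat < i := by omega
      simp only [h0, if_pos, dif_pos hj]
      rw [IH _ hj _ (by omega)]
      by_cases hz : i - g.toNat = 0
      · rw [if_pos hz, if_neg (by omega : ¬ i = 0), chunksR, dif_pos (by simp [hGG]; omega)]
        simp [hz]
      · rw [if_neg hz, if_neg (by omega : ¬ i = 0), chunksR.eq_def (g.toNat - 1) (s.take i),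
           dif_neg (by simp [hGG]; omega)]
        have h1 : (s.take i).length = i := by simp; omega
        rw [h1, hGG, List.take_take, List.drop_take]
        have h2 : min (i - g.toNat) i = i - g.toNat := by omega
        rw [h2]
        simp
    · simp only [if_neg h0, if_pos (by omega : i = 0)]
      simp
lemma slice_nonneg (t : List Char) (a b : Int) (ha : 0 ≤ a) (hb : 0 ≤ b) :
    PySem.List.slice t (some a) (some b) = (t.drop a.toNat).take (b.toNat - a.toNat) := by
  simp only [PySem.List.slice, PySem.List.clampIdx]
  rw [if_neg (by omega), if_neg (by omega)]
  by_cases h : a.toNat ≤ t.length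
  · rw [min_eq_left h, List.take_eq_take_iff]
    simp only [List.length_drop]
    omega
  · rw [min_eq_right (Nat.le_of_not_le h), List.drop_length,
        List.drop_of_length_le (Nat.le_of_not_le h)]
    simp

lemma pyRange_cons_of_pos (a b s : Int) (hs : 0 < s) (hab : a < b) :
    PySem.List.pyRange a b s = a :: PySem.List.pyRange (a+s) b s := by
  rw [PySem.List.pyRange_of_pos _ _ hs, PySem.List.pyRange_of_pos _ _ hs, if_pos hab]
  have key : (b - a + s - 1) / s = (b - a - 1) / s + 1 := by
    have h : b - a + s - 1 = (b - a - 1) + 1 * s := by ring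
    rw [h, Int.add_mul_ediv_right _ _ (by omega)]
  by_cases h2 : a + s < b
  · rw [if_pos h2]
    have e2 : b - (a + s) + s - 1 = b - a - 1 := by ring
    have hnn : 0 ≤ (b - a - 1) / s := Int.ediv_nonneg (by omega) (by omega)
    rw [e2, key, Int.toNat_add hnn (by norm_num)]
    have h1 : Int.toNat 1 = 1 := rfl
    rw [h1, List.range_succ_eq_map]
    simp only [List.map_cons, List.map_map, Nat.cast_zero, mul_zero, add_zero]
    congr 1
    refine List.map_congr_left (fun k _ => ?_)
    simp only [Function.comp]
    push_cast
    ring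
  · rw [if_neg h2]
    have hx : (b - a - 1) / s = 0 := Int.ediv_eq_zero_of_lt (by omega) (by omega)
    rw [key, hx]
    norm_num

lemma pyRange_shift (b s : Int) (hs : 0 < s) :
    PySem.List.pyRange s b s = (PySem.List.pyRange 0 (b - s) s).map (· + s) := by
  rw [PySem.List.pyRange_of_pos _ _ hs, PySem.List.pyRange_of_pos _ _ hs, List.map_map]
  have hc : (s < b) ↔ (0 < b - s) := by omega
  have he : b - s - 0 + s - 1 = b - s + s - 1 := by ring
  rw [if_congr hc rfl rfl, he]
  refine List.map_congr_left (fun k _ => ?_)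
  simp only [Function.comp]
  ring

lemma slice_shift (t : List Char) (g : Int) (a b : Int) (hg : 0 < g) (ha : 0 ≤ a) (hb : 0 ≤ b) :
    PySem.List.slice t (some (a + g)) (some (b + g)) = PySem.List.slice (t.drop g.toNat) (some a) (some b) := by
  rw [slice_nonneg _ _ _ (by omega) (by omega), slice_nonneg _ _ _ ha hb]
  rw [List.drop_drop]
  have h1 : (a + g).toNat = a.toNat + g.toNat := by omega
  have h2 : (b + g).toNat - (a + g).toNat = b.toNat - a.toNat := by omega
  rw [h2, h1, Nat.add_comm a.toNat g.toNat]

lemma comp_eq_chunksL (g : Int) (hg : 0 < g) (t : List Char) :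
    (PySem.List.pyRange 0 (PySem.List.len t) g).map (fun i => PySem.List.slice t (some i) (some (i + g)))
      = chunksL (g.toNat - 1) t := by
  have hgn : ((g.toNat : Int)) = g := Int.toNat_of_nonneg hg.le
  induction ht : t.length using Nat.strong_induction_on generalizing t with
  | _ L IH =>
    subst ht
    by_cases hnil : t = []
    · subst hnil
      rw [chunksL]
      simp [PySem.List.len, PySem.List.pyRange_of_pos _ _ hg]
    · have hL : 0 < t.length := List.length_pos_of_ne_nil hnil
      rw [chunksL, dif_neg hnil]
      have hlen : PySem.List.len t = (t.length : Int) := by simp [pysem]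
      rw [hlen, pyRange_cons_of_pos _ _ _ hg (by exact_mod_cast hL), List.map_cons]
      congr 1
      · -- head chunk: t[0 : g] = t.take (g.toNat - 1 + 1)
        rw [zero_add, slice_nonneg _ _ _ le_rfl hg.le]
        have hgg : g.toNat - 1 + 1 = g.toNat := by omega
        simp [hgg]
      · -- tail
        rw [zero_add, pyRange_shift _ _ hg, List.map_map]
        by_cases hcase : g.toNat ≤ t.length
        case neg =>
          have hd : t.drop (g.toNat - 1 + 1) = [] := List.drop_eq_nil_of_le (by omega)
          rw [hd, chunksL]
          rw [PySem.List.pyRange_of_pos _ _ hg, if_neg (by omega)]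
          simp
        have hrec := IH (t.drop (g.toNat - 1 + 1)).length (by simp; omega) (t.drop (g.toNat - 1 + 1)) rfl
        have hdl : PySem.List.len (t.drop (g.toNat - 1 + 1)) = (t.length : Int) - g := by
          rw [PySem.List.len_eq]
          simp only [List.length_drop]
          omega
        rw [hdl] at hrec
        rw [← hrec]
        refine List.map_congr_left (fun i hi => ?_)
        have hi0 : 0 ≤ i := by
          rw [PySem.List.pyRange_of_pos _ _ hg] at hi
          simp at hi
          obtain ⟨k, -, hk⟩ := hi
          have : 0 ≤ g * (k : Int) := by positivity
          omega
        have hgg : (g.toNat - 1 + 1) = g.toNat := by omega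
        rw [hgg]
        have hss := slice_shift t g i (i + g) hg hi0 (by omega)
        simp only [Function.comp]
        exact hss

lemma chunksL_nil (g : Nat) : chunksL g [] = [] := by rw [chunksL]; simp

lemma chunksL_append (g : Nat) (u v : List Char) (h : (g+1) ∣ u.length) :
    chunksL g (u ++ v) = chunksL g u ++ chunksL g v := by
  induction hu : u.length using Nat.strong_induction_on generalizing u with
  | _ L IH =>
    subst hu
    by_cases hnil : u = []
    · subst hnil; simp [chunksL_nil]
    · have hL : 0 < u.length := List.length_pos_of_ne_nil hnil
      have hGle : g + 1 ≤ u.length := Nat.le_of_dvd hL h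
      rw [chunksL.eq_def g (u ++ v), chunksL.eq_def g u,
          dif_neg (by simp [hnil]), dif_neg hnil]
      rw [List.take_append_of_le_length hGle, List.drop_append_of_le_length hGle]
      rw [List.cons_append]
      congr 1
      exact IH (u.drop (g+1)).length (by simp; omega) (u.drop (g+1))
        (by simpa using Nat.dvd_sub h dvd_rfl) rfl

lemma chunksL_small (g : Nat) (t : List Char) (ht : t ≠ []) (hle : t.length ≤ g+1) :
    chunksL g t = [t] := by
  rw [chunksL, dif_neg ht, List.take_of_length_le hle, List.drop_eq_nil_of_le hle, chunksL_nil]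

lemma chunksLR (g : Nat) (t : List Char) (ht : t ≠ []) (h : (g+1) ∣ t.length) :
    chunksL g t = chunksR g t := by
  induction hu : t.length using Nat.strong_induction_on generalizing t with
  | _ L IH =>
    subst hu
    have hL : 0 < t.length := List.length_pos_of_ne_nil ht
    have hGle : g + 1 ≤ t.length := Nat.le_of_dvd hL h
    by_cases hbase : t.length ≤ g + 1
    · rw [chunksR, dif_pos hbase]
      exact chunksL_small g t ht hbase
    · rw [chunksR.eq_def, dif_neg hbase]
      have hsplit : t = t.take (t.length - (g+1)) ++ t.drop (t.length - (g+1)) :=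
        (List.take_append_drop _ _).symm
      have hdvd : (g+1) ∣ (t.take (t.length - (g+1))).length := by
        simp only [List.length_take, min_eq_left (by omega : t.length - (g+1) ≤ t.length)]
        exact Nat.dvd_sub h dvd_rfl
      conv_lhs => rw [hsplit]
      rw [chunksL_append g _ _ hdvd]
      have htne : t.take (t.length - (g+1)) ≠ [] := by
        intro hn
        rw [List.take_eq_nil_iff] at hn
        rcases hn with h1 | h1
        · omega
        · exact ht h1
      congr 1
      · exact IH _ (by simp; omega) _ htne hdvd rfl
      · have hdne : t.drop (t.length - (g+1)) ≠ [] := by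
          intro hn
          have := congrArg List.length hn
          simp at this
          omega
        rw [chunksL_small g _ hdne (by simp; omega)]

lemma chunksR_ne_nil (g : Nat) (t : List Char) : chunksR g t ≠ [] := by
  rw [chunksR.eq_def]; split <;> simp

lemma headI_append_ne {α : Type} [Inhabited α] (x y : List α) (hx : x ≠ []) :
    (x ++ y).headI = x.headI := by
  cases x
  · simp at hx
  · simp

lemma tail_append_ne {α : Type} (x y : List α) (hx : x ≠ []) :
    (x ++ y).tail = x.tail ++ y := by
  cases x
  · simp at hx
  · simp

lemma chunksR_headI_len (g : Nat) (t : List Char) (ht : t ≠ []) :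
    (chunksR g t).headI.length = if t.length % (g+1) = 0 then g+1 else t.length % (g+1) := by
  induction hu : t.length using Nat.strong_induction_on generalizing t with
  | _ L IH =>
    subst hu
    have hL : 0 < t.length := List.length_pos_of_ne_nil ht
    by_cases hbase : t.length ≤ g + 1
    · rw [chunksR, dif_pos hbase]
      simp only [List.headI]
      by_cases heq : t.length = g + 1
      · rw [heq]; simp
      · have hm : t.length % (g+1) = t.length := Nat.mod_eq_of_lt (by omega)
        rw [hm, if_neg (by omega)]
    · rw [chunksR.eq_def, dif_neg hbase]
      have htne : t.take (t.length - (g+1)) ≠ [] := by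
        intro hn; rw [List.take_eq_nil_iff] at hn
        rcases hn with h1 | h1
        · omega
        · exact ht h1
      rw [headI_append_ne _ _ (chunksR_ne_nil g _)]
      rw [IH _ (by simp; omega) _ htne rfl]
      have hlt : (t.take (t.length - (g+1))).length = t.length - (g+1) := by simp
      rw [hlt]
      have hmod : (t.length - (g+1)) % (g+1) = t.length % (g+1) := by
        conv_rhs => rw [Nat.mod_eq_sub_mod (by omega)]
      rw [hmod]

lemma chunksR_pad (g : Nat) (s : List Char) (p : Nat) (hs : s ≠ []) (hp : p < g+1)
    (hmod : (p + s.length) % (g+1) = 0) :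
    chunksR g (List.replicate p '0' ++ s)
      = (List.replicate p '0' ++ (chunksR g s).headI) :: (chunksR g s).tail := by
  induction hu : s.length using Nat.strong_induction_on generalizing s with
  | _ L IH =>
    subst hu
    have hL : 0 < s.length := List.length_pos_of_ne_nil hs
    by_cases hbase : s.length ≤ g + 1
    · -- then p + s.length = g + 1
      have hpl : p + s.length = g + 1 := by
        have h1 : 0 < p + s.length := by omega
        have h2 : p + s.length < 2 * (g+1) := by omega
        rcases Nat.dvd_of_mod_eq_zero hmod with ⟨k, hk⟩
        have hk1 : k = 1 := by
          rcases k with _ | _ | k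
          · rw [Nat.mul_zero] at hk; omega
          · rfl
          · exfalso; nlinarith
        rw [hk1, mul_one] at hk
        omega
      rw [chunksR.eq_def g (List.replicate p '0' ++ s), dif_pos (by simp; omega)]
      rw [chunksR, dif_pos hbase]
      simp
    · have hGle : g + 1 < s.length := by omega
      rw [chunksR.eq_def g (List.replicate p '0' ++ s),
          dif_neg (by simp; omega)]
      have hlen : (List.replicate p '0' ++ s).length = p + s.length := by simp
      have e1 : (List.replicate p '0' ++ s).take ((List.replicate p '0' ++ s).length - (g+1))
          = List.replicate p '0' ++ s.take (s.length - (g+1)) := by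
        rw [hlen, List.take_append]
        congr 1
        · rw [List.take_of_length_le (by simp; omega)]
        · congr 1
          simp
          omega
      have e2 : (List.replicate p '0' ++ s).drop ((List.replicate p '0' ++ s).length - (g+1))
          = s.drop (s.length - (g+1)) := by
        rw [hlen, List.drop_append]
        rw [List.drop_of_length_le (by simp; omega), List.nil_append]
        congr 1
        simp
        omega
      rw [e1, e2]
      have htne : s.take (s.length - (g+1)) ≠ [] := by
        intro hn; rw [List.take_eq_nil_iff] at hn
        rcases hn with h1 | h1
        · omega
        · exact hs h1
      have hmod' : (p + (s.take (s.length - (g+1))).length) % (g+1) = 0 := by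
        rw [List.length_take, min_eq_left (by omega)]
        have : p + (s.length - (g+1)) + (g+1) = p + s.length := by omega
        have h2 := hmod
        rw [← this] at h2
        simpa [Nat.add_mod_right] using h2
      rw [IH _ (by simp; omega) _ htne hmod' rfl]
      -- now relate headI/tail of chunksR s
      rw [chunksR.eq_def g s, dif_neg (by omega)]
      rw [headI_append_ne _ _ (chunksR_ne_nil g _), tail_append_ne _ _ (chunksR_ne_nil g _)]
      simp

lemma main_groups (g : Int) (hg : 0 < g) (s : List Char) (hs : s ≠ []) :
    (PySem.List.pyRange 0 (PySem.List.len (if PySem.Int.mod (PySem.List.len s) g ≠ 0 then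
        List.replicate (g - PySem.Int.mod (PySem.List.len s) g).toNat '0' ++ s else s)) g).map
      (fun i => PySem.List.slice (if PySem.Int.mod (PySem.List.len s) g ≠ 0 then
        List.replicate (g - PySem.Int.mod (PySem.List.len s) g).toNat '0' ++ s else s) (some i) (some (i + g)))
      = (List.replicate (g.toNat - (fws_loop s g s.length []).headI.length) '0'
          ++ (fws_loop s g s.length []).headI) :: (fws_loop s g s.length []).tail := by
  have hgn : ((g.toNat : Int)) = g := Int.toNat_of_nonneg hg.le
  have hG1 : g.toNat - 1 + 1 = g.toNat := by omega
  have hrlt : s.length % g.toNat < g.toNat := Nat.mod_lt _ (by omega)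
  have hmodc : PySem.Int.mod (PySem.List.len s) g = ((s.length % g.toNat : Nat) : Int) := by
    rw [PySem.List.len_eq, ← hgn, PySem.Int.mod_natCast]
    simp
  have hpad : (if PySem.Int.mod (PySem.List.len s) g ≠ 0 then
        List.replicate (g - PySem.Int.mod (PySem.List.len s) g).toNat '0' ++ s else s)
      = List.replicate (if s.length % g.toNat = 0 then 0 else g.toNat - s.length % g.toNat) '0' ++ s := by
    rw [hmodc]
    by_cases hr : s.length % g.toNat = 0
    · simp [hr]
    · rw [if_pos (by exact_mod_cast hr), if_neg hr]
      congr 2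
      omega
  rw [hpad]
  have hloop : fws_loop s g s.length [] = chunksR (g.toNat - 1) s := by
    rw [loop_eq s g hg s.length [] le_rfl,
        if_neg (by simpa using List.length_pos_of_ne_nil hs |>.ne'), List.take_length,
        List.append_nil]
  rw [hloop]
  rw [comp_eq_chunksL g hg]
  have hdvd : ((if s.length % g.toNat = 0 then 0 else g.toNat - s.length % g.toNat) + s.length) % g.toNat = 0 := by
    by_cases hr : s.length % g.toNat = 0
    · simpa [hr] using hr
    · rw [if_neg hr]
      have e1 : (g.toNat - s.length % g.toNat) % g.toNat = g.toNat - s.length % g.toNat :=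
        Nat.mod_eq_of_lt (by omega)
      rw [Nat.add_mod, e1, Nat.sub_add_cancel hrlt.le, Nat.mod_self]
  have hpne : List.replicate (if s.length % g.toNat = 0 then 0 else g.toNat - s.length % g.toNat) '0' ++ s ≠ [] := by
    simp [hs]
  rw [chunksLR (g.toNat - 1) _ hpne (by rw [hG1]; simp; exact Nat.dvd_of_mod_eq_zero hdvd)]
  rw [chunksR_pad (g.toNat - 1) s _ hs (by rw [hG1]; split <;> omega) (by rw [hG1]; exact hdvd)]
  have hh := chunksR_headI_len (g.toNat - 1) s hs
  rw [hG1] at hh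
  have hpe : g.toNat - (chunksR (g.toNat - 1) s).headI.length
      = (if s.length % g.toNat = 0 then 0 else g.toNat - s.length % g.toNat) := by
    rw [hh]; split <;> omega
  rw [hpe]

lemma ports_core (number base : Int) (separator : String) (gv : Int) (hgval : 0 < gv) :
    format_with_separators number base separator (some gv)
      = format_with_separators_alt number base separator (some gv) := by
  have hchain : (if base = 2 then ((PySem.Int.pyBin number).toList).drop 2
      else if base = 8 then (pyOctChars number).drop 2
      else if base = 10 then PySem.Int.toChars number
      else if base = 16 then (pyHexChars number).drop 2
      else PySem.Int.toChars number) = fws_digits number base := by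
    unfold fws_digits
    by_cases h1 : base = 2 <;> by_cases h2 : base = 8 <;> by_cases h3 : base = 10 <;>
      by_cases h4 : base = 16 <;> simp [h1, h2, h3, h4]
  simp only [format_with_separators, format_with_separators_alt]
  rw [hchain]
  have hs := fws_digits_ne_nil number base
  have hmg := main_groups gv hgval (fws_digits number base) hs
  have hne : fws_loop (fws_digits number base) gv (fws_digits number base).length [] ≠ [] := by
    rw [loop_eq _ _ hgval _ [] le_rfl,
        if_neg (by simpa using List.length_pos_of_ne_nil hs |>.ne'), List.append_nil]
    exact chunksR_ne_nil _ _
  obtain ⟨c, rest, hcr⟩ : ∃ c rest,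
      fws_loop (fws_digits number base) gv (fws_digits number base).length [] = c :: rest := by
    cases hx : fws_loop (fws_digits number base) gv (fws_digits number base).length [] with
    | nil => exact absurd hx hne
    | cons c rest => exact ⟨c, rest, rfl⟩
  rw [hcr] at hmg
  simp only [List.headI, List.tail] at hmg
  rw [hcr, hmg]

lemma ports_eq (number base : Int) (separator : String) (group_size : Option Int)
    (hg : 0 < group_size.getD 1) :
    format_with_separators number base separator group_size
      = format_with_separators_alt number base separator group_size := by
  cases group_size with
  | some gs => exact ports_core number base separator gs (by simpa using hg)
  | none =>
    exact ports_core number base separator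
      (if base = 2 then 8 else if base = 8 then 3 else if base = 10 then 3 else if base = 16 then 4 else 4)
      (by split_ifs <;> norm_num)

-- ===== VERDICT (by name: the statement is the Claim_ definition above) =====
theorem format_with_separators_spec : Claim_equal_format_with_separators := by
  intro number base separator group_size _hD hP
  exact ports_eq number base separator group_size hP
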